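-- pv_equiv track=rewrite | github.com/SoraChalry/algorithm | SWExpertAcademy/Homework/2_PASS_BUT_REVIEW/4839_이진탐색/s1.py | search
-- ===== SOURCE A (Python) =====
-- def search(t, P, search_num):
--     top = t
--     bottom = P
--     middle = (top+bottom)//2
--     if middle == search_num :
--         return 1
--     elif middle < search_num :
--         top = middle
--     else :
--         bottom = middle
--
--     return search(top, bottom, search_num)+1
-- ===== SOURCE B (Python) =====
-- def search(t, P, search_num):
--     # Work in relative coordinates: r = target's offset from the lower endpoint,
--     # d = interval width. The absolute endpoints and search_num drop out of the
--     # loop; each probe is at offset d//2.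
--     r = search_num - t
--     d = P - t
--     count = 0
--     while True:
--         count += 1
--         m = d // 2
--         if m == r:
--             return count
--         if m < r:
--             if m == 0:           # probe no longer moves: target unreachable
--                 raise ValueError("search_num is unreachable")
--             r -= m
--             d -= m
--         else:
--             if m == d:           # probe no longer moves: target unreachable
--                 raise ValueError("search_num is unreachable")
--             d = m
-- ===== Notes on version B (the rewrite author's own statement) =====
-- stated objective: alternative
-- what changed: Re-expresses the probe sequence in relative coordinates: an explicit while-loop over the target offset r = search_num - t and interval width d = P - t (probe at offset d//2) with a count accumulator and a stalled-probe ValueError guard, instead of A's tail recursion on the absolute endpoints with +1 added on the way back out; Pre_ excludes exactly the inputs whose probe sequence never hits search_num, on which A raises RecursionError and B raises ValueError.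
import Mathlib
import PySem

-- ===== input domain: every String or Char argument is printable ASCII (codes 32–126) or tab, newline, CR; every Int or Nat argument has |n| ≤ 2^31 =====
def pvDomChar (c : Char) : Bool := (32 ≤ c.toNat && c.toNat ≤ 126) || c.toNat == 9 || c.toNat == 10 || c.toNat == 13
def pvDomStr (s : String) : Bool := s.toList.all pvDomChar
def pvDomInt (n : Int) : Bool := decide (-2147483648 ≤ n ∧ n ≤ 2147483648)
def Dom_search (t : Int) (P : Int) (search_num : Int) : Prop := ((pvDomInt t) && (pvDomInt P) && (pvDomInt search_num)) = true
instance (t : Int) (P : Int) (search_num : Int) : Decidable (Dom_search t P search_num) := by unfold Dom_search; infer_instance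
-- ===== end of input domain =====

-- B re-expresses A's probe sequence in relative coordinates (offset/width) as an explicit loop with a count accumulator, replacing A's tail recursion on absolute endpoints; objective: alternative.


-- ===== PORT A =====
-- A's recursion, with fuel only to make it total in Lean (inside Pre_search the
-- Python recursion depth is ≤ 35 on Dom, far below the fuel 64).
def searchFuelA (fuel : Nat) (t : Int) (P : Int) (search_num : Int) : Int :=
  match fuel with
  | 0 => 0
  | Nat.succ n =>
    let top := t
    let bottom := P
    let middle := PySem.Int.floordiv (top + bottom) 2
    if middle = search_num then 1
    else if middle < search_num then searchFuelA n middle bottom search_num + 1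
    else searchFuelA n top middle search_num + 1

def search (t : Int) (P : Int) (search_num : Int) : Int :=
  searchFuelA 64 t P search_num

-- ===== PORT B =====
-- B's while-loop over (offset r, width d) with a count accumulator; the same
-- fuel guard for totality (never exhausted inside Pre_search on Dom, where B's
-- Python loop returns). The -1 stands for B's ValueError on a stalled probe,
-- raised exactly where A's recursion never converges (RecursionError); both
-- are excluded by Pre_search.
def searchLoopB (fuel : Nat) (r : Int) (d : Int) (count : Int) : Int :=
  match fuel with
  | 0 => count
  | Nat.succ n =>
    let count := count + 1
    let m := PySem.Int.floordiv d 2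
    if m = r then count
    else if m < r then
      if m = 0 then -1 else searchLoopB n (r - m) (d - m) count
    else
      if m = d then -1 else searchLoopB n r m count

def search_alt (t : Int) (P : Int) (search_num : Int) : Int :=
  searchLoopB 64 (search_num - t) (P - t) 0

-- ===== PRECONDITION & SPEC =====
-- Pre_search admits exactly the inputs on which Python A returns: the probe
-- sequence hits search_num iff t ≤ search_num < P (with t < P) or the very
-- first midpoint is search_num; on every other input A's recursion never
-- converges and raises RecursionError (B's loop never terminates there).
def Pre_search (t : Int) (P : Int) (search_num : Int) : Prop :=
  (t < P ∧ t ≤ search_num ∧ search_num < P) ∨ search_num = PySem.Int.floordiv (t + P) 2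
instance (t : Int) (P : Int) (search_num : Int) : Decidable (Pre_search t P search_num) := by
  unfold Pre_search; infer_instance
def pvWitness_search : Int × Int × Int := (0, 10, 7)

def Spec_search (t : Int) (P : Int) (search_num : Int) (out : Int) : Prop := out = search_alt t P search_num
instance (t : Int) (P : Int) (search_num : Int) (out : Int) : Decidable (Spec_search t P search_num out) := by unfold Spec_search; infer_instance

-- ===== CLAIM (what is proved, stated in full; the proofs are below) =====
def Claim_equal_search : Prop := ∀ (t : Int) (P : Int) (search_num : Int), Dom_search t P search_num → Pre_search t P search_num → Spec_search t P search_num (search t P search_num)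

-- ===== LEMMAS AND PROOFS =====
-- Translation invariance: B's state (r, d) = (x - a, b - a) tracks A's state
-- (a, b, x); the midpoint relation mid = a + d//2 makes the branches coincide,
-- and the invariant a ≤ x < b (or a first-probe hit) keeps the fuel in lockstep.
theorem searchLoopB_eq_searchFuelA (fuel : Nat) :
    ∀ (a b x c : Int), Pre_search a b x →
      searchLoopB fuel (x - a) (b - a) c = searchFuelA fuel a b x + c := by
  induction fuel with
  | zero => intro a b x c _; simp [searchLoopB, searchFuelA]
  | succ n ih =>
    intro a b x c hpre
    simp only [searchLoopB, searchFuelA]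
    have hmid : PySem.Int.floordiv (a + b) 2 * 2 ≤ a + b ∧
        a + b < (PySem.Int.floordiv (a + b) 2 + 1) * 2 :=
      (PySem.Int.floordiv_eq_iff_of_pos (by norm_num)).mp rfl
    have hm : PySem.Int.floordiv (b - a) 2 * 2 ≤ b - a ∧
        b - a < (PySem.Int.floordiv (b - a) 2 + 1) * 2 :=
      (PySem.Int.floordiv_eq_iff_of_pos (by norm_num)).mp rfl
    -- mid = a + m
    have hrel : PySem.Int.floordiv (a + b) 2 = a + PySem.Int.floordiv (b - a) 2 := by omega
    rcases hpre with ⟨hab, hax, hxb⟩ | hhit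
    · by_cases h1 : PySem.Int.floordiv (b - a) 2 = x - a
      · rw [if_pos h1, if_pos (show PySem.Int.floordiv (a + b) 2 = x by omega)]; omega
      · rw [if_neg h1, if_neg (show ¬ PySem.Int.floordiv (a + b) 2 = x by omega)]
        by_cases h2 : PySem.Int.floordiv (b - a) 2 < x - a
        · -- left progress: A recurses on (mid, b); B's new state is (x - mid, b - mid)
          rw [if_pos h2, if_pos (show PySem.Int.floordiv (a + b) 2 < x by omega),
              if_neg (show ¬ PySem.Int.floordiv (b - a) 2 = 0 by omega)]
          have e1 : x - a - PySem.Int.floordiv (b - a) 2 = x - PySem.Int.floordiv (a + b) 2 := by omega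
          have e2 : b - a - PySem.Int.floordiv (b - a) 2 = b - PySem.Int.floordiv (a + b) 2 := by omega
          rw [e1, e2, ih (PySem.Int.floordiv (a + b) 2) b x (c + 1) (Or.inl (by omega))]; omega
        · -- right progress: A recurses on (a, mid); B's new width is mid - a = m
          rw [if_neg h2, if_neg (show ¬ PySem.Int.floordiv (a + b) 2 < x by omega),
              if_neg (show ¬ PySem.Int.floordiv (b - a) 2 = b - a by omega)]
          have e2 : PySem.Int.floordiv (b - a) 2 = PySem.Int.floordiv (a + b) 2 - a := by omega
          rw [e2, ih a (PySem.Int.floordiv (a + b) 2) x (c + 1) (Or.inl (by omega))]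
          omega
    · -- the very first midpoint is the target: both return immediately
      rw [if_pos (by omega), if_pos hhit.symm]; omega

-- ===== VERDICT (by name: the statement is the Claim_ definition above) =====
theorem search_spec : Claim_equal_search := by
  intro t P x _ hpre
  unfold Spec_search search search_alt
  rw [searchLoopB_eq_searchFuelA 64 t P x 0 hpre]
  omega
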